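-- pv_equiv track=rewrite | github.com/yerimeeei/Rosalind | A12-Q39.py | suffix_tree_edges
-- ===== SOURCE A (Python) =====
-- def build_suffix_array(s):
--     return sorted(range(len(s)), key=lambda i: s[i:])
--
-- def build_lcp(s, sa):
--     n = len(s)
--     rank = [0] * n
--     for i, v in enumerate(sa):
--         rank[v] = i
--
--     h = 0
--     lcp = [0] * (n - 1)
--
--     for i in range(n):
--         if rank[i] > 0:
--             j = sa[rank[i] - 1]
--             while i + h < n and j + h < n and s[i + h] == s[j + h]:
--                 h += 1
--             lcp[rank[i] - 1] = h
--             if h > 0: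
--                 h -= 1
--     return lcp
--
-- def suffix_tree_edges(s):
--     sa = build_suffix_array(s)
--     lcp = build_lcp(s, sa)
--
--     # Node stack: (string_depth, start, end)
--     stack = [(0, None, None)]
--     edges = []
--
--     for i in range(len(sa)):
--         suffix_start = sa[i]
--         cur_lcp = lcp[i - 1] if i > 0 else 0
--
--         # pop until top depth <= cur_lcp
--         while stack[-1][0] > cur_lcp:
--             stack.pop()
--
--         # parent node info
--         parent_depth, parent_start, parent_end = stack[-1]
--
--         # edge for new leaf
--         edge_start = suffix_start + cur_lcp
--         edge_end = len(s)
--         edges.append(s[edge_start:edge_end])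
--
--         # push leaf node with its depth
--         leaf_depth = len(s) - suffix_start
--         stack.append((leaf_depth, edge_start, edge_end))
--
--     return edges
-- ===== SOURCE B (Python) =====
-- def suffix_tree_edges(s):
--     # Sort the suffixes themselves; each emitted label is the suffix with the
--     # longest common prefix with its sorted predecessor removed.
--     suffixes = sorted(s[i:] for i in range(len(s)))
--     edges = []
--     prev = ""
--     for suf in suffixes:
--         k = 0
--         while k < len(prev) and k < len(suf) and prev[k] == suf[k]:
--             k += 1
--         edges.append(suf[k:])
--         prev = suf
--     return edges
-- ===== Notes on version B (the rewrite author's own statement) =====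
-- stated objective: simpler
-- what changed: B drops the Kasai LCP computation (rank array, h-carry while loop) and the node stack entirely: it sorts the suffix strings themselves and emits each suffix minus its direct character-by-character common prefix with the sorted predecessor.
import Mathlib
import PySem

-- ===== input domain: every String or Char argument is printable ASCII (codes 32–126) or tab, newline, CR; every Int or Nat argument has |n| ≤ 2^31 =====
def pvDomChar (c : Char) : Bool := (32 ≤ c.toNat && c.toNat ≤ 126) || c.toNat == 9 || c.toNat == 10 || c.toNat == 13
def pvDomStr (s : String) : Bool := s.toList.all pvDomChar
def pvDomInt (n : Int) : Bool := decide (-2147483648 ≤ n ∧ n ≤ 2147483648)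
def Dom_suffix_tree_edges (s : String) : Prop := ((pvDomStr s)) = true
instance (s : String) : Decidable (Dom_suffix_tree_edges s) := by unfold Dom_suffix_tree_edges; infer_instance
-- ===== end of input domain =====

-- B drops A's Kasai LCP machinery (rank array, carried-h while loop) and the node stack:
-- it sorts the suffix strings themselves and emits each suffix minus its character-by-character
-- common prefix with its sorted predecessor (objective: simpler; same return value, proved below).

-- ===== PORT A =====
def build_suffix_array (s : String) : List Int :=
  PySem.List.sorted (PySem.List.pyRange 0 (PySem.Str.len s) 1)
    (fun i => PySem.Str.slice s (some i) none)

-- the 'while i+h<n and j+h<n and s[i+h]==s[j+h]: h += 1' loop of build_lcp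
def kasaiWhile (s : String) (n i j : Int) (h : Int) : Int :=
  if _hc : i + h < n ∧ j + h < n ∧ PySem.Str.pyGet? s (i + h) = PySem.Str.pyGet? s (j + h) then
    kasaiWhile s n i j (h + 1)
  else h
termination_by (n - (i + h)).toNat
decreasing_by omega

def build_lcp (s : String) (sa : List Int) : List Int :=
  let n := PySem.Str.len s
  let rank : List Int := List.replicate n.toNat 0
  let rank := (PySem.List.enumerate sa).foldl (fun r iv => PySem.List.pySetD r iv.2 iv.1) rank
  let res := (PySem.List.pyRange 0 n 1).foldl
    (fun (st : Int × List Int) i =>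
      let h := st.1
      let lcp := st.2
      if PySem.List.pyGetD rank i 0 > 0 then
        let j := PySem.List.pyGetD sa (PySem.List.pyGetD rank i 0 - 1) 0
        let h := kasaiWhile s n i j h
        let lcp := PySem.List.pySetD lcp (PySem.List.pyGetD rank i 0 - 1) h
        if h > 0 then (h - 1, lcp) else (h, lcp)
      else (h, lcp))
    ((0 : Int), List.replicate (n - 1).toNat (0 : Int))
  res.2

-- 'while stack[-1][0] > cur_lcp: stack.pop()' (the Python stack is kept top-first here)
def stePop (stack : List (Int × Option Int × Option Int)) (curLcp : Int) :
    List (Int × Option Int × Option Int) :=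
  match stack with
  | top :: rest => if top.1 > curLcp then stePop rest curLcp else top :: rest
  | [] => []

def suffix_tree_edges (s : String) : List String :=
  let sa := build_suffix_array s
  let lcp := build_lcp s sa
  let res := (PySem.List.pyRange 0 (PySem.List.len sa) 1).foldl
    (fun (st : List (Int × Option Int × Option Int) × List String) i =>
      let stack := st.1
      let edges := st.2
      let suffixStart := PySem.List.pyGetD sa i 0
      let curLcp := if i > 0 then PySem.List.pyGetD lcp (i - 1) 0 else 0
      let stack := stePop stack curLcp
      let edgeStart := suffixStart + curLcp
      let edgeEnd := PySem.Str.len s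
      let edges := edges ++ [PySem.Str.slice s (some edgeStart) (some edgeEnd)]
      let leafDepth := PySem.Str.len s - suffixStart
      ((leafDepth, some edgeStart, some edgeEnd) :: stack, edges))
    ([((0 : Int), (none : Option Int), (none : Option Int))], ([] : List String))
  res.2

-- ===== PORT B =====
-- 'while k < len(prev) and k < len(suf) and prev[k] == suf[k]: k += 1'
def bLcpWhile (prev cur : String) (k : Int) : Int :=
  if _hc : k < PySem.Str.len prev ∧ k < PySem.Str.len cur ∧
      PySem.Str.pyGet? prev k = PySem.Str.pyGet? cur k then
    bLcpWhile prev cur (k + 1)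
  else k
termination_by (PySem.Str.len prev - k).toNat
decreasing_by simp [PySem.Str.len] at *; omega

def suffix_tree_edges_alt (s : String) : List String :=
  let suffixes := PySem.List.sorted
    ((PySem.List.pyRange 0 (PySem.Str.len s) 1).map (fun i => PySem.Str.slice s (some i) none))
    (fun x => x)
  let res := suffixes.foldl
    (fun (st : List String × String) suf =>
      let k := bLcpWhile st.2 suf 0
      (st.1 ++ [PySem.Str.slice suf (some k) none], suf))
    (([] : List String), "")
  res.1

-- ===== PRECONDITION & SPEC =====
def Spec_suffix_tree_edges (s : String) (out : List String) : Prop := out = suffix_tree_edges_alt s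
instance (s : String) (out : List String) : Decidable (Spec_suffix_tree_edges s out) := by unfold Spec_suffix_tree_edges; infer_instance

-- ===== CLAIM (what is proved, stated in full; the proofs are below) =====
def Claim_equal_suffix_tree_edges : Prop := ∀ (s : String), Dom_suffix_tree_edges s → Spec_suffix_tree_edges s (suffix_tree_edges s)

-- ===== LEMMAS AND PROOFS =====

-- the sorted list of suffix start positions (proof-side model of the suffix array)
def saN (l : List Char) : List Nat :=
  PySem.List.sorted (List.range l.length) (fun k => l.drop k)

-- length of the longest common prefix of two character lists
def lcpN : List Char → List Char → Nat
  | a :: as, b :: bs => if a = b then lcpN as bs + 1 else 0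
  | _, _ => 0

-- canonical result: walk the sorted suffix starts carrying the previous suffix
def canonFrom (l : List Char) (prev : List Char) : List Nat → List String
  | [] => []
  | k :: rest =>
      String.ofList ((l.drop k).drop (lcpN prev (l.drop k))) :: canonFrom l (l.drop k) rest

-- ---- basic facts about saN ----
-- PySem.List.sorted applied at two (propositionally equal) DecidableLT instances
lemma sorted_instIrrel {α κ : Type} [LT κ] (d1 d2 : DecidableLT κ)
    (xs : List α) (key : α → κ) (rev : Bool) :
    @PySem.List.sorted α κ _ d1 xs key rev = @PySem.List.sorted α κ _ d2 xs key rev := by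
  congr 1

lemma saN_perm (l : List Char) : (saN l).Perm (List.range l.length) :=
  PySem.List.sorted_perm _ _ _

lemma saN_length (l : List Char) : (saN l).length = l.length := by
  simpa using (saN_perm l).length_eq

lemma mem_saN {l : List Char} {k : Nat} : k ∈ saN l ↔ k < l.length := by
  rw [(saN_perm l).mem_iff, List.mem_range]

lemma saN_nodup (l : List Char) : (saN l).Nodup :=
  (saN_perm l).nodup_iff.mpr (List.nodup_range)

lemma drop_inj {l : List Char} {a b : Nat} (ha : a < l.length) (hb : b < l.length)
    (h : l.drop a = l.drop b) : a = b := by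
  have := congrArg List.length h
  simp [List.length_drop] at this
  omega

lemma saN_pairwise_le (l : List Char) :
    (saN l).Pairwise (fun a b => l.drop a ≤ l.drop b) := by
  unfold saN
  rw [sorted_instIrrel _ (@LinearOrder.toDecidableLT _ inferInstance)]
  exact PySem.List.sorted_pairwise (List.range l.length) (fun k => l.drop k)

lemma saN_strict {l : List Char} {q r : Nat} (hq : q < (saN l).length)
    (hr : r < (saN l).length) (hlt : q < r) :
    l.drop ((saN l)[q]) < l.drop ((saN l)[r]) := by
  have hle := (List.pairwise_iff_getElem.mp (saN_pairwise_le l)) q r hq hr hlt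
  have hne : (saN l)[q] ≠ (saN l)[r] := by
    intro h
    exact absurd ((List.Nodup.getElem_inj_iff (saN_nodup l)).mp h) (Nat.ne_of_lt hlt)
  refine lt_of_le_of_ne hle (fun h => hne ?_)
  exact drop_inj (mem_saN.mp (List.getElem_mem hq)) (mem_saN.mp (List.getElem_mem hr)) h

lemma saN_pairwise_lt (l : List Char) :
    (saN l).Pairwise (fun a b => l.drop a < l.drop b) :=
  List.pairwise_iff_getElem.mpr (fun _ _ hq hr hlt => saN_strict hq hr hlt)

lemma saN_reflect {l : List Char} {q r : Nat} (hq : q < (saN l).length)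
    (hr : r < (saN l).length) (h : l.drop ((saN l)[q]) < l.drop ((saN l)[r])) : q < r := by
  by_contra hc
  push_neg at hc
  rcases lt_or_eq_of_le hc with h2 | h2
  · exact absurd (h.trans (saN_strict hr hq h2)) (lt_irrefl _)
  · subst h2
    exact absurd h (lt_irrefl _)

-- ---- lcpN toolkit ----
lemma lcpN_nil_left (b : List Char) : lcpN [] b = 0 := by cases b <;> rfl

lemma lcpN_le_left : ∀ (a b : List Char), lcpN a b ≤ a.length := by
  intro a
  induction a with
  | nil => intro b; simp [lcpN_nil_left]
  | cons x as ih =>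
    intro b
    cases b with
    | nil => simp [lcpN]
    | cons y bs =>
      simp only [lcpN]
      split_ifs
      · simpa using ih bs
      · simp

lemma lcpN_comm : ∀ (a b : List Char), lcpN a b = lcpN b a := by
  intro a
  induction a with
  | nil => intro b; cases b <;> rfl
  | cons x as ih =>
    intro b
    cases b with
    | nil => rfl
    | cons y bs =>
      simp only [lcpN]
      rcases eq_or_ne x y with h | h
      · subst h; simp [ih bs]
      · simp [h, Ne.symm h]

lemma lcpN_cons (x : Char) (u v : List Char) : lcpN (x :: u) (x :: v) = lcpN u v + 1 := by
  simp [lcpN]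

lemma lcpN_le_right (a b : List Char) : lcpN a b ≤ b.length := by
  rw [lcpN_comm]; exact lcpN_le_left b a

lemma lcpN_getElem : ∀ (a b : List Char) (t : Nat), t < lcpN a b →
    ∀ (h1 : t < a.length) (h2 : t < b.length), a[t] = b[t] := by
  intro a
  induction a with
  | nil => intro b t ht; simp [lcpN_nil_left] at ht
  | cons x as ih =>
    intro b t ht h1 h2
    cases b with
    | nil => simp [lcpN] at ht
    | cons y bs =>
      simp only [lcpN] at ht
      split_ifs at ht with hxy
      · cases t with
        | zero => simpa using hxy
        | succ t' => simpa using ih bs t' (by omega) (by simpa using h1) (by simpa using h2)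
      · omega

lemma lcpN_stop : ∀ (a b : List Char), ∀ (ha : lcpN a b < a.length) (hb : lcpN a b < b.length),
    a[lcpN a b] ≠ b[lcpN a b] := by
  intro a
  induction a with
  | nil => intro b ha; simp at ha
  | cons x as ih =>
    intro b ha hb
    cases b with
    | nil => simp at hb
    | cons y bs =>
      by_cases hxy : x = y
      · subst hxy
        simp only [lcpN_cons] at ha hb ⊢
        simpa using ih bs (by simpa using ha) (by simpa using hb)
      · simp only [lcpN, if_neg hxy] at *
        simpa using hxy

lemma lcpN_ne_at {a b : List Char} {t : Nat} (ht : t = lcpN a b)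
    (h1 : t < a.length) (h2 : t < b.length) : a[t] ≠ b[t] := by
  subst ht
  exact lcpN_stop a b h1 h2

lemma lcpN_tail {a b : List Char} (h : 1 ≤ lcpN a b) :
    lcpN a.tail b.tail = lcpN a b - 1 := by
  cases a with
  | nil => simp [lcpN_nil_left] at h
  | cons x as =>
    cases b with
    | nil => simp [lcpN] at h
    | cons y bs =>
      by_cases hxy : x = y
      · subst hxy; simp [lcpN]
      · simp [lcpN, hxy] at h

lemma lcpN_drop_succ {l : List Char} {i j : Nat} (h : 1 ≤ lcpN (l.drop i) (l.drop j)) :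
    lcpN (l.drop (i + 1)) (l.drop (j + 1)) = lcpN (l.drop i) (l.drop j) - 1 := by
  rw [← List.tail_drop, ← List.tail_drop]
  exact lcpN_tail h

lemma lcpN_self (c : List Char) : lcpN c c = c.length := by
  induction c with
  | nil => rfl
  | cons z cs ihc => simp [lcpN, ihc]

lemma lt_iff_lex (a b : List Char) : a < b ↔ List.Lex (· < ·) a b := Iff.rfl

lemma lcpN_mono : ∀ (b a c : List Char), a ≤ b → b ≤ c → lcpN a c ≤ lcpN b c := by
  intro b
  induction b with
  | nil =>
    intro a c hab _
    rcases lt_or_eq_of_le hab with h | h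
    · rw [lt_iff_lex] at h; cases h
    · subst h; exact le_refl _
  | cons y bs ih =>
    intro a c hab hbc
    rcases lt_or_eq_of_le hab with h | h
    case inr => subst h; exact le_refl _
    rw [lt_iff_lex] at h
    rcases lt_or_eq_of_le hbc with h2 | h2
    case inr => subst h2; exact le_trans (lcpN_le_right a _) (le_of_eq (lcpN_self _).symm)
    rw [lt_iff_lex] at h2
    cases c with
    | nil => cases h2
    | cons z cs =>
      cases h with
      | nil => simp [lcpN_nil_left]
      | rel hxy =>
        rename_i x as
        have hxz : x ≠ z := by
          cases h2 with
          | rel hyz => exact ne_of_lt (lt_trans hxy hyz)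
          | cons h2' => exact ne_of_lt hxy
        simp [lcpN, hxz]
      | cons h' =>
        rename_i as
        cases h2 with
        | rel hyz => simp [lcpN, ne_of_lt hyz]
        | cons h2' =>
          rw [lcpN_cons, lcpN_cons]
          have := ih as cs (le_of_lt h') (le_of_lt h2')
          omega

lemma drop_lt_shift {l : List Char} {i j : Nat} (hlt : l.drop i < l.drop j)
    (h : 1 ≤ lcpN (l.drop i) (l.drop j)) : l.drop (i + 1) < l.drop (j + 1) := by
  have hi : i < l.length := by
    have := lcpN_le_left (l.drop i) (l.drop j)
    rw [List.length_drop] at this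
    omega
  have hj : j < l.length := by
    have := lcpN_le_right (l.drop i) (l.drop j)
    rw [List.length_drop] at this
    omega
  have hdi := List.drop_eq_getElem_cons hi
  have hdj := List.drop_eq_getElem_cons hj
  have hhead : l[i] = l[j] := by
    have := lcpN_getElem (l.drop i) (l.drop j) 0 h (by rw [List.length_drop]; omega)
      (by rw [List.length_drop]; omega)
    simpa [List.getElem_drop] using this
  rw [hdi, hdj, hhead] at hlt
  exact (List.cons_lt_cons_self).mp hlt

-- ---- while-loop characterisations ----
lemma kasaiWhile_spec (s : String) (i j h0 : Nat)
    (h : h0 ≤ lcpN (s.toList.drop i) (s.toList.drop j)) :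
    kasaiWhile s (s.toList.length : Int) (i : Int) (j : Int) (h0 : Int)
      = (lcpN (s.toList.drop i) (s.toList.drop j) : Int) := by
  have hLi : lcpN (s.toList.drop i) (s.toList.drop j) ≤ s.toList.length - i := by
    have := lcpN_le_left (s.toList.drop i) (s.toList.drop j)
    simpa using this
  have hLj : lcpN (s.toList.drop i) (s.toList.drop j) ≤ s.toList.length - j := by
    have := lcpN_le_right (s.toList.drop i) (s.toList.drop j)
    simpa using this
  have key : ∀ (d hh : Nat), hh ≤ lcpN (s.toList.drop i) (s.toList.drop j) →
      lcpN (s.toList.drop i) (s.toList.drop j) - hh = d →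
      kasaiWhile s (s.toList.length : Int) (i : Int) (j : Int) (hh : Int)
        = (lcpN (s.toList.drop i) (s.toList.drop j) : Int) := by
    intro d
    induction d with
    | zero =>
      intro hh hle hd
      rw [kasaiWhile, dif_neg]
      · omega
      rintro ⟨hc1, hc2, hc3⟩
      have hi : i + hh < s.toList.length := by
        have : ((i + hh : Nat) : Int) < (s.toList.length : Int) := by push_cast; push_cast at hc1; omega
        exact_mod_cast this
      have hj : j + hh < s.toList.length := by
        have : ((j + hh : Nat) : Int) < (s.toList.length : Int) := by push_cast; push_cast at hc2; omega
        exact_mod_cast this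
      have hcast1 : ((i : Int) + (hh : Int)) = ((i + hh : Nat) : Int) := by push_cast; ring
      have hcast2 : ((j : Int) + (hh : Int)) = ((j + hh : Nat) : Int) := by push_cast; ring
      rw [hcast1, hcast2, PySem.Str.pyGet?_natCast, PySem.Str.pyGet?_natCast,
        List.getElem?_eq_getElem hi, List.getElem?_eq_getElem hj] at hc3
      have heq := Option.some_inj.mp hc3
      have hne : (s.toList.drop i)[hh]'(by rw [List.length_drop]; omega)
          ≠ (s.toList.drop j)[hh]'(by rw [List.length_drop]; omega) :=
        lcpN_ne_at (by omega) _ _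
      apply hne
      rw [List.getElem_drop, List.getElem_drop]
      exact heq
    | succ d ih =>
      intro hh hle hd
      have hlt : hh < lcpN (s.toList.drop i) (s.toList.drop j) := by omega
      rw [kasaiWhile, dif_pos]
      · have hc : ((hh : Int) + 1) = ((hh + 1 : Nat) : Int) := by push_cast; ring
        rw [hc]
        exact ih (hh + 1) (by omega) (by omega)
      · refine ⟨by push_cast; omega, by push_cast; omega, ?_⟩
        have heq : (s.toList.drop i)[hh]'(by rw [List.length_drop]; omega)
            = (s.toList.drop j)[hh]'(by rw [List.length_drop]; omega) :=
          lcpN_getElem _ _ hh hlt _ _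
        rw [List.getElem_drop, List.getElem_drop] at heq
        have hcast1 : ((i : Int) + (hh : Int)) = ((i + hh : Nat) : Int) := by push_cast; ring
        have hcast2 : ((j : Int) + (hh : Int)) = ((j + hh : Nat) : Int) := by push_cast; ring
        rw [hcast1, hcast2, PySem.Str.pyGet?_natCast, PySem.Str.pyGet?_natCast,
          List.getElem?_eq_getElem (by omega), List.getElem?_eq_getElem (by omega)]
        exact congrArg some heq
  exact key _ h0 h rfl

lemma strLen_eq (s : String) : PySem.Str.len s = (s.toList.length : Int) := by
  simp [PySem.Str.len_eq]

lemma bLcpWhile_spec (p c : String) (k0 : Nat) (h : k0 ≤ lcpN p.toList c.toList) :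
    bLcpWhile p c (k0 : Int) = (lcpN p.toList c.toList : Int) := by
  have hLp : lcpN p.toList c.toList ≤ p.toList.length := lcpN_le_left _ _
  have hLc : lcpN p.toList c.toList ≤ c.toList.length := lcpN_le_right _ _
  have key : ∀ (d kk : Nat), kk ≤ lcpN p.toList c.toList →
      lcpN p.toList c.toList - kk = d →
      bLcpWhile p c (kk : Int) = (lcpN p.toList c.toList : Int) := by
    intro d
    induction d with
    | zero =>
      intro kk hle hd
      rw [bLcpWhile, dif_neg]
      · omega
      rintro ⟨hc1, hc2, hc3⟩
      rw [strLen_eq] at hc1 hc2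
      have hi : kk < p.toList.length := by exact_mod_cast hc1
      have hj : kk < c.toList.length := by exact_mod_cast hc2
      rw [PySem.Str.pyGet?_natCast, PySem.Str.pyGet?_natCast,
        List.getElem?_eq_getElem hi, List.getElem?_eq_getElem hj] at hc3
      exact lcpN_ne_at (by omega) hi hj (Option.some_inj.mp hc3)
    | succ d ih =>
      intro kk hle hd
      have hlt : kk < lcpN p.toList c.toList := by omega
      rw [bLcpWhile, dif_pos]
      · have hc : ((kk : Int) + 1) = ((kk + 1 : Nat) : Int) := by push_cast; ring
        rw [hc]
        exact ih (kk + 1) (by omega) (by omega)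
      · refine ⟨by rw [strLen_eq]; exact_mod_cast (by omega : kk < p.toList.length),
          by rw [strLen_eq]; exact_mod_cast (by omega : kk < c.toList.length), ?_⟩
        rw [PySem.Str.pyGet?_natCast, PySem.Str.pyGet?_natCast,
          List.getElem?_eq_getElem (by omega), List.getElem?_eq_getElem (by omega)]
        exact congrArg some (lcpN_getElem _ _ kk hlt _ _)
  exact key _ k0 h rfl

-- ---- string slice bridges ----
lemma sliceSuffix_eq (s : String) (k : Nat) :
    PySem.Str.slice s (some (k : Int)) none = String.ofList (s.toList.drop k) := by
  apply String.toList_inj.mp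
  rw [String.toList_ofList]
  simp [PySem.Str.slice, PySem.List.slice_from_natCast]

lemma sliceFull_eq (s : String) (a : Nat) :
    PySem.Str.slice s (some (a : Int)) (some (s.toList.length : Int))
      = String.ofList (s.toList.drop a) := by
  apply String.toList_inj.mp
  rw [String.toList_ofList]
  simp [PySem.Str.slice, PySem.List.slice_natCast]

-- ---- the two suffix lists ----
lemma build_suffix_array_eq (s : String) :
    build_suffix_array s = (saN s.toList).map (Nat.cast : Nat → Int) := by
  unfold build_suffix_array
  rw [strLen_eq, PySem.List.pyRange_zero_nat]
  rw [sorted_instIrrel _ (@LinearOrder.toDecidableLT _ inferInstance)]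
  apply PySem.List.sorted_eq_of_perm_of_pairwise_lt
  · exact (saN_perm s.toList).map _
  · rw [List.pairwise_map]
    refine (saN_pairwise_lt s.toList).imp ?_
    intro a b hab
    rw [sliceSuffix_eq, sliceSuffix_eq]
    rw [String.lt_iff_toList_lt, String.toList_ofList, String.toList_ofList]
    exact hab

lemma alt_suffixes_eq (s : String) :
    PySem.List.sorted
      ((PySem.List.pyRange 0 (PySem.Str.len s) 1).map (fun i => PySem.Str.slice s (some i) none))
      (fun x => x)
    = (saN s.toList).map (fun k => String.ofList (s.toList.drop k)) := by
  rw [strLen_eq, PySem.List.pyRange_zero_nat, List.map_map]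
  rw [List.map_congr_left (l := List.range s.toList.length)
    (f := (fun i => PySem.Str.slice s (some i) none) ∘ (fun k : Nat => (k : Int)))
    (g := fun k : Nat => String.ofList (s.toList.drop k))
    (fun k _ => sliceSuffix_eq s k)]
  rw [sorted_instIrrel _ (@LinearOrder.toDecidableLT _ inferInstance)]
  apply PySem.List.sorted_eq_of_perm_of_pairwise_lt
  · exact (saN_perm s.toList).map _
  · rw [List.pairwise_map]
    refine (saN_pairwise_lt s.toList).imp ?_
    intro a b hab
    rw [String.lt_iff_toList_lt, String.toList_ofList, String.toList_ofList]
    exact hab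

-- ---- the rank array ----
lemma getD_set_ne (r : List Int) (x v : Nat) (s0 : Int) (h : x ≠ v) :
    (r.set x s0).getD v 0 = r.getD v 0 := by
  simp [List.getD_eq_getElem?_getD, List.getElem?_set_ne h]

lemma getD_set_self (r : List Int) (x : Nat) (s0 : Int) (h : x < r.length) :
    (r.set x s0).getD x 0 = s0 := by
  simp [List.getD_eq_getElem?_getD, h]

lemma rank_fold_untouched (xs : List Nat) (s0 : Int) (r : List Int) (v : Nat)
    (hv : v ∉ xs) :
    PySem.List.pyGetD ((PySem.List.enumerate (List.map (Nat.cast : Nat → Int) xs) s0).foldl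
        (fun r iv => PySem.List.pySetD r iv.2 iv.1) r) (v : Int) 0
      = PySem.List.pyGetD r (v : Int) 0 := by
  induction xs generalizing s0 r with
  | nil => simp [PySem.List.enumerate_nil]
  | cons x xs ih =>
    rw [List.map_cons, PySem.List.enumerate_cons, List.foldl_cons]
    rw [ih _ _ (by simp at hv; exact hv.2)]
    rw [PySem.List.pySetD_natCast, PySem.List.pyGetD_natCast, PySem.List.pyGetD_natCast]
    exact getD_set_ne r x v s0 (by simp at hv; exact fun h => hv.1 h.symm)

lemma rank_fold_get (xs : List Nat) (s0 : Int) (r : List Int)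
    (hnd : xs.Nodup) (hlt : ∀ x ∈ xs, x < r.length) (k : Nat) (hk : k < xs.length) :
    PySem.List.pyGetD ((PySem.List.enumerate (List.map (Nat.cast : Nat → Int) xs) s0).foldl
        (fun r iv => PySem.List.pySetD r iv.2 iv.1) r) ((xs[k] : Nat) : Int) 0
      = s0 + k := by
  induction xs generalizing s0 r k with
  | nil => simp at hk
  | cons x xs ih =>
    rw [List.map_cons, PySem.List.enumerate_cons, List.foldl_cons]
    cases k with
    | zero =>
      rw [List.getElem_cons_zero]
      rw [rank_fold_untouched xs (s0 + 1) _ x (by simp at hnd; exact hnd.1)]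
      rw [PySem.List.pySetD_natCast, PySem.List.pyGetD_natCast]
      rw [getD_set_self r x s0 (hlt x (by simp))]
      simp
    | succ k' =>
      rw [List.getElem_cons_succ]
      rw [PySem.List.pySetD_natCast]
      rw [ih (s0 + 1) _ (by simp at hnd; exact hnd.2)
        (fun y hy => by rw [List.length_set]; exact hlt y (by simp [hy])) k' (by simpa using hk)]
      push_cast
      ring

-- rank of a text position = its index in saN; saG = total indexing into saN
def rkN (l : List Char) (v : Nat) : Nat := (saN l).idxOf v

def saG (l : List Char) (t : Nat) : Nat := (saN l).getD t 0

lemma saG_lt {l : List Char} {t : Nat} (ht : t < l.length) : saG l t < l.length := by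
  unfold saG
  rw [List.getD_eq_getElem _ _ (by rw [saN_length]; exact ht)]
  exact mem_saN.mp (List.getElem_mem _)

lemma rkN_lt {l : List Char} {v : Nat} (hv : v < l.length) : rkN l v < l.length := by
  rw [← saN_length l]
  exact List.idxOf_lt_length_of_mem (mem_saN.mpr hv)

lemma saG_rkN {l : List Char} {v : Nat} (hv : v < l.length) : saG l (rkN l v) = v := by
  unfold saG
  rw [List.getD_eq_getElem _ _ (by rw [saN_length]; exact rkN_lt hv)]
  exact List.getElem_idxOf (by rw [saN_length]; exact rkN_lt hv)

lemma rkN_saG {l : List Char} {t : Nat} (ht : t < l.length) : rkN l (saG l t) = t := by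
  unfold saG rkN
  rw [List.getD_eq_getElem _ _ (by rw [saN_length]; exact ht)]
  have h1 : (saN l).idxOf ((saN l)[t]'(by rw [saN_length]; exact ht)) < (saN l).length :=
    List.idxOf_lt_length_of_mem (List.getElem_mem _)
  have h2 := List.getElem_idxOf (xs := saN l) (x := (saN l)[t]'(by rw [saN_length]; exact ht)) h1
  exact (List.Nodup.getElem_inj_iff (saN_nodup l)).mp h2

lemma saG_strict {l : List Char} {q r : Nat} (hlt : q < r) (hr : r < l.length) :
    l.drop (saG l q) < l.drop (saG l r) := by
  unfold saG
  rw [List.getD_eq_getElem _ _ (by rw [saN_length]; omega),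
    List.getD_eq_getElem _ _ (by rw [saN_length]; exact hr)]
  exact saN_strict _ _ hlt

lemma saG_reflect {l : List Char} {q r : Nat} (hq : q < l.length) (hr : r < l.length)
    (h : l.drop (saG l q) < l.drop (saG l r)) : q < r := by
  unfold saG at h
  rw [List.getD_eq_getElem _ _ (by rw [saN_length]; exact hq),
    List.getD_eq_getElem _ _ (by rw [saN_length]; exact hr)] at h
  exact saN_reflect _ _ h

def rankArr (s : String) (sa : List Int) : List Int :=
  (PySem.List.enumerate sa).foldl (fun r iv => PySem.List.pySetD r iv.2 iv.1)
    (List.replicate (PySem.Str.len s).toNat 0)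

lemma rankArr_get (s : String) (v : Nat) (hv : v < s.toList.length) :
    PySem.List.pyGetD (rankArr s ((saN s.toList).map (Nat.cast : Nat → Int))) (v : Int) 0
      = (rkN s.toList v : Int) := by
  have hk : rkN s.toList v < (saN s.toList).length := by
    rw [saN_length]; exact rkN_lt hv
  have hlen : (List.replicate (PySem.Str.len s).toNat (0 : Int)).length = s.toList.length := by
    rw [List.length_replicate, strLen_eq, Int.toNat_natCast]
  have hv' := saG_rkN hv
  unfold saG at hv'
  rw [List.getD_eq_getElem _ _ hk] at hv'
  have := rank_fold_get (saN s.toList) 0 (List.replicate (PySem.Str.len s).toNat 0)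
    (saN_nodup s.toList)
    (fun x hx => by rw [hlen]; exact mem_saN.mp hx) (rkN s.toList v) hk
  rw [hv'] at this
  unfold rankArr
  rw [this]
  ring

-- ---- the Kasai fold ----
def stepA (s : String) (rank sa : List Int) (st : Int × List Int) (i : Int) : Int × List Int :=
  if PySem.List.pyGetD rank i 0 > 0 then
    if kasaiWhile s (PySem.Str.len s) i
        (PySem.List.pyGetD sa (PySem.List.pyGetD rank i 0 - 1) 0) st.1 > 0 then
      (kasaiWhile s (PySem.Str.len s) i
          (PySem.List.pyGetD sa (PySem.List.pyGetD rank i 0 - 1) 0) st.1 - 1,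
       PySem.List.pySetD st.2 (PySem.List.pyGetD rank i 0 - 1)
         (kasaiWhile s (PySem.Str.len s) i
           (PySem.List.pyGetD sa (PySem.List.pyGetD rank i 0 - 1) 0) st.1))
    else
      (kasaiWhile s (PySem.Str.len s) i
          (PySem.List.pyGetD sa (PySem.List.pyGetD rank i 0 - 1) 0) st.1,
       PySem.List.pySetD st.2 (PySem.List.pyGetD rank i 0 - 1)
         (kasaiWhile s (PySem.Str.len s) i
           (PySem.List.pyGetD sa (PySem.List.pyGetD rank i 0 - 1) 0) st.1))
  else (st.1, st.2)

lemma build_lcp_unfold (s : String) (sa : List Int) :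
    build_lcp s sa
      = ((PySem.List.pyRange 0 (PySem.Str.len s) 1).foldl (stepA s (rankArr s sa) sa)
          ((0 : Int), List.replicate ((PySem.Str.len s) - 1).toNat (0 : Int))).2 := rfl

def lcpAdj (l : List Char) (t : Nat) : Nat :=
  lcpN (l.drop (saG l t)) (l.drop (saG l (t + 1)))

def KInv (l : List Char) (m : Nat) (st : Int × List Int) : Prop :=
  st.2.length = l.length - 1 ∧
  (∀ t, t < l.length - 1 →
    st.2.getD t 0 = if saG l (t + 1) < m then (lcpAdj l t : Int) else 0) ∧
  (m < l.length → ∃ hN : Nat, st.1 = (hN : Int) ∧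
    (hN = 0 ∨ ∃ p, p < l.length ∧ l.drop p < l.drop m ∧ hN ≤ lcpN (l.drop p) (l.drop m)))

lemma writer_iff {l : List Char} {t m : Nat} (ht : t < l.length - 1) (hm : m < l.length) :
    saG l (t + 1) = m ↔ t + 1 = rkN l m := by
  constructor
  · intro h
    rw [← h, rkN_saG (by omega)]
  · intro h
    rw [h, saG_rkN hm]

lemma KInv_init (l : List Char) :
    KInv l 0 ((0 : Int), List.replicate (l.length - 1) (0 : Int)) := by
  refine ⟨by simp, ?_, ?_⟩
  · intro t ht
    simp [List.getD_eq_getElem?_getD, List.getElem?_replicate, ht]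
  · intro _
    exact ⟨0, by simp, Or.inl rfl⟩

lemma KInv_step (s : String) (m : Nat) (hm : m < s.toList.length) (st : Int × List Int)
    (hinv : KInv s.toList m st) :
    KInv s.toList (m + 1)
      (stepA s (rankArr s ((saN s.toList).map (Nat.cast : Nat → Int)))
        ((saN s.toList).map (Nat.cast : Nat → Int)) st (m : Int)) := by
  obtain ⟨hlen, harr, hQ⟩ := hinv
  obtain ⟨hN, hstEq, hQ'⟩ := hQ hm
  have hrank := rankArr_get s m hm
  unfold stepA
  rw [hrank, hstEq]
  by_cases hr0 : rkN s.toList m = 0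
  · -- rank[m] == 0 : state unchanged
    rw [if_neg (by rw [hr0]; simp)]
    have hmin : hN = 0 := by
      rcases hQ' with h | ⟨p, hp, hplt, hple⟩
      · exact h
      · exfalso
        have hq : rkN s.toList p < rkN s.toList m := by
          apply saG_reflect (rkN_lt hp) (rkN_lt hm)
          rw [saG_rkN hp, saG_rkN hm]
          exact hplt
        omega
    refine ⟨hlen, ?_, ?_⟩
    · intro t ht
      rw [harr t ht]
      have hne : saG s.toList (t + 1) ≠ m :=
        fun hc => absurd ((writer_iff ht hm).mp hc) (by omega)
      rcases Nat.lt_or_ge (saG s.toList (t + 1)) m with h | h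
      · rw [if_pos h, if_pos (by omega)]
      · rw [if_neg (by omega), if_neg (by omega)]
    · intro _
      exact ⟨hN, rfl, Or.inl hmin⟩
  · -- rank[m] = r ≥ 1
    have hr1 : 1 ≤ rkN s.toList m := by omega
    have hrlt : rkN s.toList m < s.toList.length := rkN_lt hm
    have hrv : saG s.toList (rkN s.toList m) = m := saG_rkN hm
    rw [if_pos (by exact_mod_cast hr1)]
    have hsub : ((rkN s.toList m : Int) - 1) = ((rkN s.toList m - 1 : Nat) : Int) := by omega
    have hj : PySem.List.pyGetD ((saN s.toList).map (Nat.cast : Nat → Int))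
        ((rkN s.toList m : Int) - 1) 0 = (saG s.toList (rkN s.toList m - 1) : Int) := by
      rw [hsub, PySem.List.pyGetD_natCast]
      unfold saG
      rw [List.getD_eq_getElem _ _ (by rw [List.length_map, saN_length]; omega),
        List.getD_eq_getElem _ _ (by rw [saN_length]; omega)]
      rw [List.getElem_map]
    rw [hj]
    have hjlen : saG s.toList (rkN s.toList m - 1) < s.toList.length := saG_lt (by omega)
    have hjm : s.toList.drop (saG s.toList (rkN s.toList m - 1)) < s.toList.drop m := by
      have := saG_strict (l := s.toList) (by omega : rkN s.toList m - 1 < rkN s.toList m) hrlt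
      rwa [hrv] at this
    -- h0 ≤ lcp(m, j)
    have hle : hN ≤ lcpN (s.toList.drop m) (s.toList.drop (saG s.toList (rkN s.toList m - 1))) := by
      rcases hQ' with h | ⟨p, hp, hplt, hple⟩
      · omega
      · have hqlt : rkN s.toList p < rkN s.toList m := by
          apply saG_reflect (rkN_lt hp) (rkN_lt hm)
          rw [saG_rkN hp, saG_rkN hm]
          exact hplt
        have hpj : s.toList.drop p ≤ s.toList.drop (saG s.toList (rkN s.toList m - 1)) := by
          rcases Nat.lt_or_ge (rkN s.toList p) (rkN s.toList m - 1) with h2 | h2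
          · have := saG_strict (l := s.toList) h2 (by omega)
            rw [saG_rkN hp] at this
            exact le_of_lt this
          · have heq : rkN s.toList p = rkN s.toList m - 1 := by omega
            rw [← saG_rkN hp, heq]
        calc hN ≤ lcpN (s.toList.drop p) (s.toList.drop m) := hple
          _ ≤ lcpN (s.toList.drop (saG s.toList (rkN s.toList m - 1))) (s.toList.drop m) :=
            lcpN_mono _ _ _ hpj (le_of_lt hjm)
          _ = lcpN (s.toList.drop m) (s.toList.drop (saG s.toList (rkN s.toList m - 1))) :=
            lcpN_comm _ _
    have hkas : kasaiWhile s (PySem.Str.len s) (m : Int)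
        ((saG s.toList (rkN s.toList m - 1) : Nat) : Int) (hN : Int)
        = (lcpN (s.toList.drop m) (s.toList.drop (saG s.toList (rkN s.toList m - 1))) : Int) := by
      rw [strLen_eq]
      exact kasaiWhile_spec s m _ hN hle
    rw [hkas]
    -- the written value is lcpAdj (r-1)
    have hadj : lcpAdj s.toList (rkN s.toList m - 1)
        = lcpN (s.toList.drop m) (s.toList.drop (saG s.toList (rkN s.toList m - 1))) := by
      unfold lcpAdj
      have h1 : rkN s.toList m - 1 + 1 = rkN s.toList m := by omega
      rw [h1, hrv, lcpN_comm]
    -- the updated array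
    have hset : ∀ t, t < s.toList.length - 1 →
        (PySem.List.pySetD st.2 ((rkN s.toList m : Int) - 1)
            ((lcpN (s.toList.drop m) (s.toList.drop (saG s.toList (rkN s.toList m - 1))) : Nat) : Int)).getD t 0
          = if saG s.toList (t + 1) < m + 1 then (lcpAdj s.toList t : Int) else 0 := by
      intro t ht
      rw [hsub, PySem.List.pySetD_natCast]
      by_cases hteq : t = rkN s.toList m - 1
      · rw [hteq]
        rw [getD_set_self _ _ _ (by rw [hlen]; omega)]
        rw [if_pos (by
          have h1 : rkN s.toList m - 1 + 1 = rkN s.toList m := by omega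
          rw [h1, hrv]
          omega)]
        rw [hadj]
      · rw [getD_set_ne _ _ _ _ (fun h => hteq h.symm)]
        rw [harr t ht]
        have hne : saG s.toList (t + 1) ≠ m := by
          intro hc
          have := (writer_iff ht hm).mp hc
          omega
        rcases Nat.lt_or_ge (saG s.toList (t + 1)) m with h | h
        · rw [if_pos h, if_pos (by omega)]
        · rw [if_neg (by omega), if_neg (by omega)]
    have hlen' : (PySem.List.pySetD st.2 ((rkN s.toList m : Int) - 1)
        ((lcpN (s.toList.drop m) (s.toList.drop (saG s.toList (rkN s.toList m - 1))) : Nat) : Int)).length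
        = s.toList.length - 1 := by
      rw [hsub, PySem.List.pySetD_natCast, List.length_set, hlen]
    by_cases hHm0 : ((lcpN (s.toList.drop m) (s.toList.drop (saG s.toList (rkN s.toList m - 1))) : Nat) : Int) > 0
    · rw [if_pos hHm0]
      refine ⟨hlen', hset, ?_⟩
      intro _
      by_cases hHm1 : lcpN (s.toList.drop m) (s.toList.drop (saG s.toList (rkN s.toList m - 1))) = 1
      · exact ⟨0, by rw [hHm1]; simp, Or.inl rfl⟩
      · have hHm2 : 2 ≤ lcpN (s.toList.drop m) (s.toList.drop (saG s.toList (rkN s.toList m - 1))) := by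
          have : (0:Int) < ((lcpN (s.toList.drop m) (s.toList.drop (saG s.toList (rkN s.toList m - 1))) : Nat) : Int) := hHm0
          have h0 : 0 < lcpN (s.toList.drop m) (s.toList.drop (saG s.toList (rkN s.toList m - 1))) := by exact_mod_cast this
          omega
        refine ⟨lcpN (s.toList.drop m) (s.toList.drop (saG s.toList (rkN s.toList m - 1))) - 1,
          by omega, Or.inr ⟨saG s.toList (rkN s.toList m - 1) + 1, ?_, ?_, ?_⟩⟩
        · have := lcpN_le_right (s.toList.drop m) (s.toList.drop (saG s.toList (rkN s.toList m - 1)))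
          rw [List.length_drop] at this
          omega
        · exact drop_lt_shift hjm (by rw [lcpN_comm]; omega)
        · have hd := lcpN_drop_succ (l := s.toList) (i := saG s.toList (rkN s.toList m - 1)) (j := m)
            (by rw [lcpN_comm]; omega)
          rw [hd, lcpN_comm]
    · rw [if_neg hHm0]
      refine ⟨hlen', hset, ?_⟩
      intro _
      refine ⟨lcpN (s.toList.drop m) (s.toList.drop (saG s.toList (rkN s.toList m - 1))), rfl, Or.inl ?_⟩
      omega

lemma build_lcp_eq (s : String) :
    build_lcp s (build_suffix_array s)
      = (List.range (s.toList.length - 1)).map (fun t => (lcpAdj s.toList t : Int)) := by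
  rw [build_suffix_array_eq, build_lcp_unfold, strLen_eq]
  have hrep : ((s.toList.length : Int) - 1).toNat = s.toList.length - 1 := by omega
  rw [hrep, PySem.List.pyRange_zero_nat, List.foldl_map]
  have hfold : ∀ m, m ≤ s.toList.length →
      KInv s.toList m ((List.range m).foldl
        (fun st k => stepA s (rankArr s ((saN s.toList).map (Nat.cast : Nat → Int)))
          ((saN s.toList).map (Nat.cast : Nat → Int)) st ((k : Nat) : Int))
        ((0 : Int), List.replicate (s.toList.length - 1) (0 : Int))) := by
    intro m
    induction m with
    | zero =>
      intro _
      rw [List.range_zero, List.foldl_nil]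
      exact KInv_init s.toList
    | succ m ih =>
      intro hm1
      rw [List.range_succ, List.foldl_append, List.foldl_cons, List.foldl_nil]
      exact KInv_step s m (by omega) _ (ih (by omega))
  obtain ⟨hlen, harr, -⟩ := hfold s.toList.length le_rfl
  apply List.ext_getElem
  · rw [hlen, List.length_map, List.length_range]
  · intro t h1 h2
    rw [← List.getD_eq_getElem _ 0 h1]
    rw [harr t (by omega)]
    rw [List.getElem_map, List.getElem_range]
    rw [if_pos (saG_lt (by rw [List.length_map, List.length_range] at h2; omega))]

-- ---- the A-side output fold ----
def stepE (s : String) (sa lcp : List Int)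
    (st : List (Int × Option Int × Option Int) × List String) (i : Int) :
    List (Int × Option Int × Option Int) × List String :=
  ((PySem.Str.len s - PySem.List.pyGetD sa i 0,
    some (PySem.List.pyGetD sa i 0 + (if i > 0 then PySem.List.pyGetD lcp (i - 1) 0 else 0)),
    some (PySem.Str.len s)) :: stePop st.1 (if i > 0 then PySem.List.pyGetD lcp (i - 1) 0 else 0),
   st.2 ++ [PySem.Str.slice s
     (some (PySem.List.pyGetD sa i 0 + (if i > 0 then PySem.List.pyGetD lcp (i - 1) 0 else 0)))
     (some (PySem.Str.len s))])

lemma suffix_tree_edges_unfold (s : String) :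
    suffix_tree_edges s
      = ((PySem.List.pyRange 0 (PySem.List.len (build_suffix_array s)) 1).foldl
          (stepE s (build_suffix_array s) (build_lcp s (build_suffix_array s)))
          ([((0 : Int), (none : Option Int), (none : Option Int))], ([] : List String))).2 := rfl

lemma edges_fold (s : String) (sa lcp : List Int) :
    ∀ (L : List Int) (p : List (Int × Option Int × Option Int) × List String),
    (L.foldl (stepE s sa lcp) p).2
      = p.2 ++ L.map (fun i => PySem.Str.slice s
          (some (PySem.List.pyGetD sa i 0 + (if i > 0 then PySem.List.pyGetD lcp (i - 1) 0 else 0)))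
          (some (PySem.Str.len s))) := by
  intro L
  induction L with
  | nil => intro p; simp
  | cons i rest ih =>
    intro p
    rw [List.foldl_cons, ih, List.map_cons]
    show (stepE s sa lcp p i).2 ++ _ = _
    rw [show (stepE s sa lcp p i).2 = p.2 ++ [PySem.Str.slice s
      (some (PySem.List.pyGetD sa i 0 + (if i > 0 then PySem.List.pyGetD lcp (i - 1) 0 else 0)))
      (some (PySem.Str.len s))] from rfl]
    simp

-- ---- the B-side output fold ----
def stepB (st : List String × String) (suf : String) : List String × String :=
  (st.1 ++ [PySem.Str.slice suf (some (bLcpWhile st.2 suf 0)) none], suf)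

lemma suffix_tree_edges_alt_unfold (s : String) :
    suffix_tree_edges_alt s
      = ((PySem.List.sorted
            ((PySem.List.pyRange 0 (PySem.Str.len s) 1).map
              (fun i => PySem.Str.slice s (some i) none))
            (fun x => x)).foldl stepB (([] : List String), "")).1 := rfl

def adjEdges (prev : String) : List String → List String
  | [] => []
  | c :: rest => PySem.Str.slice c (some (bLcpWhile prev c 0)) none :: adjEdges c rest

lemma alt_fold : ∀ (L : List String) (p : List String × String),
    (L.foldl stepB p).1 = p.1 ++ adjEdges p.2 L := by
  intro L
  induction L with
  | nil => intro p; simp [adjEdges]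
  | cons c rest ih =>
    intro p
    rw [List.foldl_cons, ih, adjEdges]
    show (p.1 ++ _) ++ _ = _
    simp
    rfl

-- ---- canonFrom characterisations ----
lemma adjEdges_canon (l : List Char) :
    ∀ (ks : List Nat) (pl : List Char),
    adjEdges (String.ofList pl) (ks.map (fun k => String.ofList (l.drop k)))
      = canonFrom l pl ks := by
  intro ks
  induction ks with
  | nil => intro pl; rfl
  | cons k rest ih =>
    intro pl
    rw [List.map_cons]
    show PySem.Str.slice (String.ofList (l.drop k))
        (some (bLcpWhile (String.ofList pl) (String.ofList (l.drop k)) 0)) none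
      :: adjEdges (String.ofList (l.drop k)) (rest.map (fun k => String.ofList (l.drop k)))
      = canonFrom l pl (k :: rest)
    have hb := bLcpWhile_spec (String.ofList pl) (String.ofList (l.drop k)) 0 (Nat.zero_le _)
    rw [Nat.cast_zero, String.toList_ofList, String.toList_ofList] at hb
    rw [hb, sliceSuffix_eq, String.toList_ofList, ih]
    rfl

lemma canonFrom_length (l : List Char) :
    ∀ (ks : List Nat) (pl : List Char), (canonFrom l pl ks).length = ks.length := by
  intro ks
  induction ks with
  | nil => intro pl; rfl
  | cons k rest ih => intro pl; simp [canonFrom, ih]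

lemma canonFrom_getElem (l : List Char) :
    ∀ (ks : List Nat) (pl : List Char) (t : Nat) (h : t < (canonFrom l pl ks).length),
    (canonFrom l pl ks)[t]
      = String.ofList (l.drop (ks.getD t 0 + lcpN
          (if t = 0 then pl else l.drop (ks.getD (t - 1) 0)) (l.drop (ks.getD t 0)))) := by
  intro ks
  induction ks with
  | nil => intro pl t h; simp [canonFrom] at h
  | cons k rest ih =>
    intro pl t h
    cases t with
    | zero =>
      show String.ofList ((l.drop k).drop (lcpN pl (l.drop k))) = _
      rw [List.drop_drop]
      simp [Nat.add_comm]
    | succ t' =>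
      show (canonFrom l (l.drop k) rest)[t']'(by
          rw [canonFrom_length]
          rw [canonFrom_length] at h
          simpa using h) = _
      rw [ih (l.drop k) t' _]
      cases t' with
      | zero => simp
      | succ t'' => simp

-- ---- final assembly ----
lemma saI_get {l : List Char} {t : Nat} (ht : t < l.length) :
    PySem.List.pyGetD ((saN l).map (Nat.cast : Nat → Int)) ((t : Nat) : Int) 0
      = ((saG l t : Nat) : Int) := by
  rw [PySem.List.pyGetD_natCast]
  unfold saG
  rw [List.getD_eq_getElem _ _ (by rw [List.length_map, saN_length]; exact ht),
    List.getD_eq_getElem _ _ (by rw [saN_length]; exact ht)]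
  rw [List.getElem_map]

lemma portA_eq_canon (s : String) :
    suffix_tree_edges s = canonFrom s.toList [] (saN s.toList) := by
  rw [suffix_tree_edges_unfold, build_lcp_eq, build_suffix_array_eq, edges_fold]
  rw [List.nil_append]
  rw [PySem.List.len_eq, List.length_map, saN_length]
  rw [PySem.List.pyRange_zero_nat, List.map_map]
  apply List.ext_getElem
  · rw [List.length_map, List.length_range, canonFrom_length, saN_length]
  · intro t h1 h2
    rw [List.getElem_map, List.getElem_range]
    rw [canonFrom_getElem]
    rw [List.length_map, List.length_range] at h1
    show PySem.Str.slice s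
        (some (PySem.List.pyGetD ((saN s.toList).map (Nat.cast : Nat → Int)) ((t : Nat) : Int) 0 +
          (if ((t : Nat) : Int) > 0 then
            PySem.List.pyGetD ((List.range (s.toList.length - 1)).map
              (fun t => (lcpAdj s.toList t : Int))) (((t : Nat) : Int) - 1) 0
          else 0)))
        (some (PySem.Str.len s)) = _
    rw [saI_get h1, strLen_eq]
    have hks : (saN s.toList).getD t 0 = saG s.toList t := rfl
    cases t with
    | zero =>
      rw [if_neg (by simp)]
      rw [add_zero]
      rw [sliceFull_eq]
      rw [hks]
      rw [if_pos rfl, lcpN_nil_left, Nat.add_zero]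
    | succ t' =>
      rw [if_pos (by positivity)]
      have hsub : (((t' + 1 : Nat) : Int) - 1) = ((t' : Nat) : Int) := by push_cast; ring
      rw [hsub, PySem.List.pyGetD_natCast]
      rw [List.getD_eq_getElem _ _ (by rw [List.length_map, List.length_range]; omega)]
      rw [List.getElem_map, List.getElem_range]
      have hcast : ((saG s.toList (t' + 1) : Nat) : Int) + ((lcpAdj s.toList t' : Nat) : Int)
          = ((saG s.toList (t' + 1) + lcpAdj s.toList t' : Nat) : Int) := by push_cast; ring
      rw [hcast, sliceFull_eq]
      rw [hks]
      have h0 : ¬ (t' + 1 = 0) := by omega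
      rw [if_neg h0]
      rfl

lemma portB_eq_canon (s : String) :
    suffix_tree_edges_alt s = canonFrom s.toList [] (saN s.toList) := by
  rw [suffix_tree_edges_alt_unfold, alt_suffixes_eq, alt_fold, List.nil_append]
  have hempty : ("" : String) = String.ofList [] := rfl
  rw [hempty, adjEdges_canon]

-- ===== VERDICT (by name: the statement is the Claim_ definition above) =====
theorem suffix_tree_edges_spec : Claim_equal_suffix_tree_edges := by
  intro s _hdom
  unfold Spec_suffix_tree_edges
  rw [portA_eq_canon, portB_eq_canon]
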